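-- pv_equiv track=rewrite | github.com/ccctw-ma/leetcode | src/Match/match311-320/fallIndividual.py | temperatureTrend
-- ===== SOURCE A (Python) =====
-- from typing import List
-- from typing import List, Optional
--
-- def temperatureTrend(temperatureA: List[int], temperatureB: List[int]) -> int:
--     n = len(temperatureA)
--     da = [0] * (n - 1)
--     db = [0] * (n - 1)
--     for i in range(1, n):
--         da[i - 1] = (temperatureA[i] - temperatureA[i - 1])
--         db[i - 1] = temperatureB[i] - temperatureB[i - 1]
--     res = 0
--     i = 0
--     while i < n - 1:
--         j = i
--         while j < n - 1 and (da[j] * db[j] > 0 or da[j] == db[j] == 0):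
--             j += 1
--         res = max(res, j - i)
--         i = j + 1
--     return res
-- ===== SOURCE B (Python) =====
-- from typing import List
--
-- def temperatureTrend(temperatureA: List[int], temperatureB: List[int]) -> int:
--     res = cur = 0
--     for x0, x1, y0, y1 in zip(temperatureA, temperatureA[1:], temperatureB, temperatureB[1:]):
--         sa = (x1 > x0) - (x1 < x0)
--         sb = (y1 > y0) - (y1 < y0)
--         if sa == sb:
--             cur += 1
--             if cur > res:
--                 res = cur
--         else:
--             cur = 0
--     return res
-- ===== Notes on version B (the rewrite author's own statement) =====
-- stated objective: simpler
-- what changed: Replaced the derivative arrays da/db and the index-jumping outer/inner while scan by a single zip pass comparing the signs of consecutive differences with a running-streak counter and no auxiliary arrays.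
import Mathlib
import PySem

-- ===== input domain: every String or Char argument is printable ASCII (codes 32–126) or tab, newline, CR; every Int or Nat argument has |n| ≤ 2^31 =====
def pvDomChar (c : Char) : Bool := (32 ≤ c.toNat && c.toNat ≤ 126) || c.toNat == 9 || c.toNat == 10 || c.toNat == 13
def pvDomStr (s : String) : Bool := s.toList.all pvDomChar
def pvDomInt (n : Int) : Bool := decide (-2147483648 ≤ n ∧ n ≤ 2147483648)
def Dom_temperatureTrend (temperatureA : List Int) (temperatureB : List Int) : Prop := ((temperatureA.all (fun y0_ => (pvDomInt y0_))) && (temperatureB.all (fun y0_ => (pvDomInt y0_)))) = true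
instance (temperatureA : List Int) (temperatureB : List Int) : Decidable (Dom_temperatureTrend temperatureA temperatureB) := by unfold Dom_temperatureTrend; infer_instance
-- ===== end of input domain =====

-- B replaces A's derivative arrays and index-jumping double while-scan by one zip pass
-- with a running streak counter (objective: simpler). Equivalence is on return values.

-- ===== PORT A =====

-- inner while loop of A: advance j while j < n-1 and trends agree at j
-- (da[j]/db[j] are always in range here, so List.getD is exact for Python's da[j])
def innerA (da db : List Int) (m j : Nat) : Nat :=
  if _h : j < m ∧ (da.getD j 0 * db.getD j 0 > 0 ∨ (da.getD j 0 = 0 ∧ db.getD j 0 = 0)) then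
    innerA da db m (j + 1)
  else j
termination_by m - j
decreasing_by omega

-- needed for termination of the outer loop
theorem innerA_ge (da db : List Int) (m j : Nat) : j ≤ innerA da db m j := by
  unfold innerA
  split
  · exact le_trans (by omega) (innerA_ge da db m (j + 1))
  · exact le_refl j
termination_by m - j
decreasing_by omega

-- outer while loop of A
def outerA (da db : List Int) (m i : Nat) (res : Int) : Int :=
  if _h : i < m then
    let j := innerA da db m i
    outerA da db m (j + 1) (max res ((j : Int) - (i : Int)))
  else res
termination_by m - i
decreasing_by
  have := innerA_ge da db m i
  omega

def temperatureTrend (temperatureA : List Int) (temperatureB : List Int) : Int :=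
  let n := temperatureA.length
  -- for i in range(1, n): da[i-1] = A[i]-A[i-1]; db[i-1] = B[i]-B[i-1]
  -- (indices into temperatureA are always in range; temperatureB[i] is in range under Pre_,
  --  so List.getD is exact for Python's indexing there)
  let dadb := (PySem.List.pyRange 1 (n : Int) 1).foldl
    (fun (p : List Int × List Int) i =>
      (p.1.set (i - 1).toNat (temperatureA.getD i.toNat 0 - temperatureA.getD (i - 1).toNat 0),
       p.2.set (i - 1).toNat (temperatureB.getD i.toNat 0 - temperatureB.getD (i - 1).toNat 0)))
    (List.replicate (n - 1) 0, List.replicate (n - 1) 0)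
  outerA dadb.1 dadb.2 (n - 1) 0 0

-- ===== PORT B =====

-- one step of B's loop over a quadruple (x0,x1,y0,y1); state = (res, cur)
def stepB (st : Int × Int) (q : (Int × Int) × (Int × Int)) : Int × Int :=
  let sa : Int := (if q.1.2 > q.1.1 then 1 else 0) - (if q.1.2 < q.1.1 then 1 else 0)
  let sb : Int := (if q.2.2 > q.2.1 then 1 else 0) - (if q.2.2 < q.2.1 then 1 else 0)
  if sa = sb then
    (if st.2 + 1 > st.1 then st.2 + 1 else st.1, st.2 + 1)
  else (st.1, 0)

def temperatureTrend_alt (temperatureA : List Int) (temperatureB : List Int) : Int :=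
  (((temperatureA.zip (temperatureA.drop 1)).zip
      (temperatureB.zip (temperatureB.drop 1))).foldl stepB (0, 0)).1

-- ===== PRECONDITION & SPEC =====
-- Pre_ excludes exactly the inputs where A raises IndexError: temperatureB shorter than
-- temperatureA while temperatureA has at least 2 elements (the loop then reads temperatureB[i] out of range).
def Pre_temperatureTrend (temperatureA : List Int) (temperatureB : List Int) : Prop :=
  temperatureA.length ≤ temperatureB.length ∨ temperatureA.length ≤ 1
instance (temperatureA : List Int) (temperatureB : List Int) : Decidable (Pre_temperatureTrend temperatureA temperatureB) := by unfold Pre_temperatureTrend; infer_instance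

def pvWitness_temperatureTrend : List Int × List Int := ([1, 2, 1], [3, 4, 5])

def Spec_temperatureTrend (temperatureA : List Int) (temperatureB : List Int) (out : Int) : Prop := out = temperatureTrend_alt temperatureA temperatureB
instance (temperatureA : List Int) (temperatureB : List Int) (out : Int) : Decidable (Spec_temperatureTrend temperatureA temperatureB out) := by unfold Spec_temperatureTrend; infer_instance

-- ===== CLAIM (what is proved, stated in full; the proofs are below) =====
def Claim_equal_temperatureTrend : Prop := ∀ (temperatureA : List Int) (temperatureB : List Int), Dom_temperatureTrend temperatureA temperatureB → Pre_temperatureTrend temperatureA temperatureB → Spec_temperatureTrend temperatureA temperatureB (temperatureTrend temperatureA temperatureB)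

-- ===== LEMMAS AND PROOFS =====

-- number of leading `true`s
def leadCount : List Bool → Nat
  | [] => 0
  | b :: t => if b then leadCount t + 1 else 0

-- longest run of `true`s
def maxRunB (c : List Bool) : Nat :=
  match c with
  | [] => 0
  | b :: t =>
    if b then max (leadCount t + 1) (maxRunB (t.drop (leadCount t + 1)))
    else maxRunB t
termination_by c.length
decreasing_by
  · simp only [List.length_drop, List.length_cons]; omega
  · simp only [List.length_cons]; omega

theorem maxRunB_eq (c : List Bool) :
    maxRunB c = max (leadCount c) (maxRunB (c.drop (leadCount c + 1))) := by
  match c with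
  | [] => simp [maxRunB, leadCount]
  | true :: t => simp [maxRunB, leadCount, List.drop_succ_cons]
  | false :: t => simp [maxRunB, leadCount]

-- boolean agreement list seen by A: index j agrees iff da[j]*db[j]>0 or both zero
def cL (da db : List Int) (m : Nat) : List Bool :=
  (List.range m).map (fun j => decide (da.getD j 0 * db.getD j 0 > 0 ∨ (da.getD j 0 = 0 ∧ db.getD j 0 = 0)))

theorem cL_length (da db : List Int) (m : Nat) : (cL da db m).length = m := by
  simp [cL]

theorem innerA_eq (da db : List Int) (m j : Nat) :
    innerA da db m j = j + leadCount ((cL da db m).drop j) := by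
  rw [innerA]
  split
  · next h =>
    have hj : j < (cL da db m).length := by rw [cL_length]; exact h.1
    rw [List.drop_eq_getElem_cons hj]
    have hc : (cL da db m)[j] = true := by
      simp only [cL, List.getElem_map, List.getElem_range, decide_eq_true_eq]
      exact h.2
    rw [hc, innerA_eq da db m (j + 1)]
    simp [leadCount]
    omega
  · next h =>
    by_cases hm : j < m
    · have hj : j < (cL da db m).length := by rw [cL_length]; exact hm
      rw [List.drop_eq_getElem_cons hj]
      have hc : (cL da db m)[j] = false := by
        simp only [cL, List.getElem_map, List.getElem_range, decide_eq_false_iff_not]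
        intro hcond
        exact h ⟨hm, hcond⟩
      rw [hc, leadCount]
      simp
    · rw [List.drop_eq_nil_of_le (by rw [cL_length]; omega)]
      simp [leadCount]
termination_by m - j
decreasing_by omega

theorem outerA_eq (da db : List Int) (m : Nat) (i : Nat) (res : Int) (hres : 0 ≤ res) :
    outerA da db m i res = max res ((maxRunB ((cL da db m).drop i) : Nat) : Int) := by
  rw [outerA]
  split
  · next h =>
    have hj := innerA_eq da db m i
    have hge : i ≤ innerA da db m i := innerA_ge da db m i
    have hres' : (0:Int) ≤ max res ((innerA da db m i : Int) - (i : Int)) := by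
      have : (i:Int) ≤ (innerA da db m i : Int) := by exact_mod_cast hge
      omega
    rw [outerA_eq da db m (innerA da db m i + 1) _ hres']
    have hdrop : ((cL da db m).drop i).drop (leadCount ((cL da db m).drop i) + 1)
        = (cL da db m).drop (innerA da db m i + 1) := by
      rw [List.drop_drop]; congr 1; omega
    have hmr := maxRunB_eq ((cL da db m).drop i)
    rw [hdrop] at hmr
    have hji : (innerA da db m i : Int) - (i : Int) = (leadCount ((cL da db m).drop i) : Int) := by
      omega
    rw [hmr, hji]
    push_cast
    omega
  · next h =>
    rw [List.drop_eq_nil_of_le (by rw [cL_length]; omega)]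
    simp [maxRunB]
    omega
termination_by m - i
decreasing_by
  have := innerA_ge da db m i
  omega

-- generic: setting every index of a list via a fold over range
theorem foldl_pair_mk {A B C : Type} (f : A -> C -> A) (g : B -> C -> B) (l : List C) (a : A) (b : B) :
    l.foldl (fun p x => (f p.1 x, g p.2 x)) (a, b) = (l.foldl f a, l.foldl g b) := by
  induction l generalizing a b with
  | nil => rfl
  | cons x t ih => simp [List.foldl_cons, ih]

theorem fold_set_range (f : Nat -> Int) :
    ∀ (m : Nat) (init : List Int), m ≤ init.length →
      (List.range m).foldl (fun l k => l.set k (f k)) init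
        = (List.range m).map f ++ init.drop m := by
  intro m
  induction m with
  | zero => intro init _; simp
  | succ m ih =>
    intro init hlen
    rw [List.range_succ, List.foldl_append, ih init (by omega)]
    have hml : ((List.range m).map f).length = m := by simp
    rw [List.foldl_cons, List.foldl_nil]
    rw [List.set_append_right _ _ (by omega)]
    have hdrop : init.drop m = init[m] :: init.drop (m + 1) :=
      List.drop_eq_getElem_cons (by omega)
    rw [hml, Nat.sub_self, hdrop, List.set_cons_zero]
    simp [List.range_succ]

-- the da/db fold fills a pair of arrays with consecutive differences
theorem fold_set_diffs (tA tB : List Int) (m : Nat) :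
    (PySem.List.pyRange 1 ((m + 1 : Nat) : Int) 1).foldl
      (fun (p : List Int × List Int) i =>
        (p.1.set (i - 1).toNat (tA.getD i.toNat 0 - tA.getD (i - 1).toNat 0),
         p.2.set (i - 1).toNat (tB.getD i.toNat 0 - tB.getD (i - 1).toNat 0)))
      (List.replicate m 0, List.replicate m 0)
    = ((List.range m).map (fun k => tA.getD (k + 1) 0 - tA.getD k 0),
       (List.range m).map (fun k => tB.getD (k + 1) 0 - tB.getD k 0)) := by
  rw [PySem.List.pyRange_one]
  have hm : ((((m + 1 : Nat) : Int)) - 1).toNat = m := by omega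
  rw [hm, List.foldl_map]
  have h1 : ∀ k : Nat, (((1 : Int) + k) - 1).toNat = k := fun k => by omega
  have h2 : ∀ k : Nat, ((1 : Int) + k).toNat = k + 1 := fun k => by omega
  simp only [h1, h2]
  rw [foldl_pair_mk (fun (l : List Int) (k : Nat) => l.set k (tA.getD (k + 1) 0 - tA.getD k 0))
        (fun (l : List Int) (k : Nat) => l.set k (tB.getD (k + 1) 0 - tB.getD k 0))]
  rw [fold_set_range _ m (List.replicate m (0:Int)) (by simp)]
  rw [fold_set_range _ m (List.replicate m (0:Int)) (by simp)]
  simp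

-- ===== B-side =====

def gB (st : Int × Int) (b : Bool) : Int × Int :=
  if b then (if st.2 + 1 > st.1 then st.2 + 1 else st.1, st.2 + 1) else (st.1, 0)

def agreeQ (q : (Int × Int) × (Int × Int)) : Bool :=
  decide (((if q.1.2 > q.1.1 then (1:Int) else 0) - (if q.1.2 < q.1.1 then 1 else 0))
        = ((if q.2.2 > q.2.1 then (1:Int) else 0) - (if q.2.2 < q.2.1 then 1 else 0)))

theorem stepB_eq (st : Int × Int) (q : (Int × Int) × (Int × Int)) :
    stepB st q = gB st (agreeQ q) := by
  unfold stepB gB agreeQ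
  by_cases h : ((if q.1.2 > q.1.1 then (1:Int) else 0) - (if q.1.2 < q.1.1 then 1 else 0))
        = ((if q.2.2 > q.2.1 then (1:Int) else 0) - (if q.2.2 < q.2.1 then 1 else 0)) <;>
    simp [h]

theorem foldB (c : List Bool) :
    ∀ (res cur : Int), 0 ≤ cur → cur ≤ res →
      (c.foldl gB (res, cur)).1
        = max res (max (cur + (leadCount c : Int)) ((maxRunB (c.drop (leadCount c + 1)) : Nat) : Int)) := by
  induction c with
  | nil =>
    intro res cur h0 h1
    simp [leadCount, maxRunB]
    omega
  | cons b t ih =>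
    intro res cur h0 h1
    cases b
    · have hg : gB (res, cur) false = (res, 0) := by simp [gB]
      rw [List.foldl_cons, hg, ih res 0 le_rfl (le_trans h0 h1)]
      have hmr := maxRunB_eq t
      simp only [leadCount, Bool.false_eq_true, if_false, List.drop_succ_cons, List.drop_zero]
      rw [hmr]
      omega
    · have hg : gB (res, cur) true = (max res (cur + 1), cur + 1) := by
        simp [gB]
        split <;> omega
      rw [List.foldl_cons, hg, ih (max res (cur + 1)) (cur + 1) (by omega) (by omega)]
      simp only [leadCount, List.drop_succ_cons]
      push_cast
      omega

theorem sign_agree (x0 x1 y0 y1 : Int) :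
    agreeQ ((x0, x1), (y0, y1))
      = decide ((x1 - x0) * (y1 - y0) > 0 ∨ (x1 - x0 = 0 ∧ y1 - y0 = 0)) := by
  unfold agreeQ
  rw [decide_eq_decide]
  simp only [gt_iff_lt]
  rw [mul_pos_iff]
  split_ifs <;> omega

-- ===== assembly =====

theorem A_eval (tA tB : List Int) :
    temperatureTrend tA tB
      = ((maxRunB (cL ((List.range (tA.length - 1)).map (fun k => tA.getD (k + 1) 0 - tA.getD k 0))
                      ((List.range (tA.length - 1)).map (fun k => tB.getD (k + 1) 0 - tB.getD k 0))
                      (tA.length - 1)) : Nat) : Int) := by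
  unfold temperatureTrend
  cases hn : tA.length with
  | zero =>
    simp only [hn]
    rw [outerA_eq _ _ _ _ _ le_rfl]
    simp [cL, maxRunB]
  | succ m =>
    simp only [hn, Nat.add_sub_cancel]
    rw [fold_set_diffs]
    rw [outerA_eq _ _ _ _ _ le_rfl]
    simp

theorem B_eval (tA tB : List Int) :
    temperatureTrend_alt tA tB
      = ((maxRunB (((tA.zip (tA.drop 1)).zip (tB.zip (tB.drop 1))).map agreeQ) : Nat) : Int) := by
  unfold temperatureTrend_alt
  have hfe : stepB = fun st q => gB st (agreeQ q) := by
    funext st q; exact stepB_eq st q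
  rw [hfe, ← List.foldl_map, foldB _ 0 0 le_rfl le_rfl]
  have hmr := maxRunB_eq (((tA.zip (tA.drop 1)).zip (tB.zip (tB.drop 1))).map agreeQ)
  rw [hmr]
  push_cast
  omega

theorem lists_eq (tA tB : List Int) (hpre : Pre_temperatureTrend tA tB) :
    ((tA.zip (tA.drop 1)).zip (tB.zip (tB.drop 1))).map agreeQ
      = cL ((List.range (tA.length - 1)).map (fun k => tA.getD (k + 1) 0 - tA.getD k 0))
           ((List.range (tA.length - 1)).map (fun k => tB.getD (k + 1) 0 - tB.getD k 0))
           (tA.length - 1) := by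
  have hB : tA.length ≤ tB.length ∨ tA.length ≤ 1 := hpre
  have hlenL : (((tA.zip (tA.drop 1)).zip (tB.zip (tB.drop 1))).map agreeQ).length
      = tA.length - 1 := by
    simp only [List.length_map, List.length_zip, List.length_drop]
    omega
  apply List.ext_getElem
  · rw [hlenL, cL_length]
  · intro k hk1 hk2
    rw [cL_length] at hk2
    have hkA : k + 1 < tA.length := by omega
    have hkB : k + 1 < tB.length := by
      rcases hB with h | h
      · omega
      · omega
    simp only [List.length_map, List.length_zip, List.length_drop] at hk1
    have hzA : k < (tA.zip (tA.drop 1)).length := by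
      simp only [List.length_zip, List.length_drop]; omega
    have hzB : k < (tB.zip (tB.drop 1)).length := by
      simp only [List.length_zip, List.length_drop]; omega
    rw [List.getElem_map, List.getElem_zip, List.getElem_zip, List.getElem_zip]
    rw [List.getElem_drop, List.getElem_drop]
    have h1k : 1 + k = k + 1 := by omega
    simp only [h1k]
    rw [sign_agree]
    simp only [cL, List.getElem_map, List.getElem_range]
    have hgA1 : (List.getD tA (k + 1) 0) = tA[k + 1] := List.getD_eq_getElem tA 0 hkA
    have hgA0 : (List.getD tA k 0) = tA[k]'(by omega) := List.getD_eq_getElem tA 0 (by omega)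
    have hgB1 : (List.getD tB (k + 1) 0) = tB[k + 1] := List.getD_eq_getElem tB 0 hkB
    have hgB0 : (List.getD tB k 0) = tB[k]'(by omega) := List.getD_eq_getElem tB 0 (by omega)
    have hda : (List.getD ((List.range (tA.length - 1)).map (fun k => tA.getD (k + 1) 0 - tA.getD k 0)) k 0)
        = tA.getD (k + 1) 0 - tA.getD k 0 := by
      rw [List.getD_eq_getElem _ _ (by simp; omega)]
      simp
    have hdb : (List.getD ((List.range (tA.length - 1)).map (fun k => tB.getD (k + 1) 0 - tB.getD k 0)) k 0)
        = tB.getD (k + 1) 0 - tB.getD k 0 := by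
      rw [List.getD_eq_getElem _ _ (by simp; omega)]
      simp
    rw [hda, hdb, hgA1, hgA0, hgB1, hgB0]

-- ===== VERDICT (by name: the statement is the Claim_ definition above) =====
theorem temperatureTrend_spec : Claim_equal_temperatureTrend := by
  intro tA tB _hdom hpre
  unfold Spec_temperatureTrend
  rw [A_eval, B_eval, lists_eq tA tB hpre]
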